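-- pv_equiv track=rewrite | github.com/russhustle/leetpattern | src/python/0601_0900/0632_smallest_range_covering_elements_from_k_lists.py | smallestRangeSliding
-- ===== SOURCE A (Python) =====
-- from math import inf
-- from typing import List
--
-- def smallestRangeSliding(nums: List[List[int]]) -> List[int]:
--     pairs = sorted((x, i) for (i, arr) in enumerate(nums) for x in arr)
--     res_l, res_r = -inf, inf
--     empty = len(nums)
--     cnt = [0] * empty
--     left = 0
--
--     for r, i in pairs:
--         if cnt[i] == 0:
--             empty -= 1
--         cnt[i] += 1
--         while empty == 0:
--             l, i = pairs[left]
--             if r - l < res_r - res_l: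
--                 res_l, res_r = l, r
--             cnt[i] -= 1
--             if cnt[i] == 0:
--                 empty += 1
--             left += 1
--
--     return [res_l, res_r]
-- ===== SOURCE B (Python) =====
-- from math import inf
-- from typing import List
--
-- def smallestRangeSliding(nums: List[List[int]]) -> List[int]:
--     # One pass over the globally sorted pairs keeping the LAST value seen per list;
--     # once every list has been seen, [min(last seen), current] is the tightest
--     # range ending at the current value.
--     pairs = sorted((x, i) for (i, arr) in enumerate(nums) for x in arr)
--     last = {}
--     res_l, res_r = -inf, inf
--     for x, i in pairs:
--         last[i] = x
--         if len(last) == len(nums):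
--             l = min(last.values())
--             if x - l < res_r - res_l:
--                 res_l, res_r = l, x
--     return [res_l, res_r]
-- ===== Notes on version B (the rewrite author's own statement) =====
-- stated objective: simpler
-- what changed: A's sliding window over the sorted pairs (per-list counts, an `empty` counter, a `left` pointer and an inner shrinking while-loop) is replaced by a single pass that keeps only the last value seen per list in a dict and, once every list has been seen, offers [min(last values), current value] as the candidate range.
-- outside the precondition, e.g. on smallestRangeSliding([[]]): A returns [-inf, inf], B returns [-inf, inf]; on smallestRangeSliding([]): A returns [-inf, inf], B returns [-inf, inf]
import Mathlib
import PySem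

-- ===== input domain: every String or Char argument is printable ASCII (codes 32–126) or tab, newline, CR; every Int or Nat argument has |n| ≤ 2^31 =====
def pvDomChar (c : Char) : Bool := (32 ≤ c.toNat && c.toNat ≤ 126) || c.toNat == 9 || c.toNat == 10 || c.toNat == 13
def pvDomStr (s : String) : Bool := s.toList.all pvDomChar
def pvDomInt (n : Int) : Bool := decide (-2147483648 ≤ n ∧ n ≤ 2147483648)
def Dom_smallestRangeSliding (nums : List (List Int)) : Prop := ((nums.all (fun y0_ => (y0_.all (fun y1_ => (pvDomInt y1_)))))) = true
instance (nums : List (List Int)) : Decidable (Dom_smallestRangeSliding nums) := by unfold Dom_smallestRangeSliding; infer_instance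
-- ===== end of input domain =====

-- B replaces A's sliding window (counts, `empty`, `left`, inner while-loop) by a single
-- pass that keeps the last value seen per list and takes the min once all lists were seen
-- (simpler; not faster). Both Pythons share their first line (the sorted pair list) and
-- the strict-improvement update, kept here as the shared helpers pvPairs / pvUpd.

-- `sorted((x, i) for (i, arr) in enumerate(nums) for x in arr)` — shared first line of A and B
def pvPairs (nums : List (List Int)) : List (Int × Int) :=
  PySem.List.sorted2
    ((PySem.List.enumerate nums).flatMap (fun ia => ia.2.map (fun x => (x, ia.1))))
    (fun t => t.1) (fun t => t.2)

-- `if r - l < res_r - res_l: res_l, res_r = l, r` — `none` is the initial (-inf, inf) pair,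
-- against which any finite width wins; shared by both Pythons verbatim
def pvUpd (res : Option (Int × Int)) (l r : Int) : Option (Int × Int) :=
  match res with
  | none => some (l, r)
  | some (a, b) => if r - l < b - a then some (l, r) else some (a, b)

-- ===== PORT A =====
-- the inner `while empty == 0` loop; fuel only guards totality: `left` grows by 1 per
-- iteration and the loop stops before `left` passes the processed prefix, so the
-- `pairs.length + 1` fuel given below is never exhausted on reachable states
def pvInnerA (pairs : List (Int × Int)) (r : Int) :
    Nat → Option (Int × Int) → List Int → Int → Int →
    Option (Int × Int) × List Int × Int × Int
  | 0, res, cnt, empty, left => (res, cnt, empty, left)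
  | fuel + 1, res, cnt, empty, left =>
    if empty = 0 then
      let li := PySem.List.pyGetD pairs left (0, 0)   -- `l, i = pairs[left]` (always in range here)
      let res' := pvUpd res li.1 r
      let cnt' := PySem.List.pySetD cnt li.2 (PySem.List.pyGetD cnt li.2 0 - 1)
      let empty' := if PySem.List.pyGetD cnt' li.2 0 = 0 then empty + 1 else empty
      pvInnerA pairs r fuel res' cnt' empty' (left + 1)
    else (res, cnt, empty, left)

-- the outer `for r, i in pairs` loop of A
def pvLoopA (pairs : List (Int × Int)) :
    List (Int × Int) → Option (Int × Int) × List Int × Int × Int →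
    Option (Int × Int) × List Int × Int × Int
  | [], st => st
  | p :: rest, st =>
    let empty1 := if PySem.List.pyGetD st.2.1 p.2 0 = 0 then st.2.2.1 - 1 else st.2.2.1
    let cnt1 := PySem.List.pySetD st.2.1 p.2 (PySem.List.pyGetD st.2.1 p.2 0 + 1)
    pvLoopA pairs rest (pvInnerA pairs p.1 (pairs.length + 1) st.1 cnt1 empty1 st.2.2.2)

def smallestRangeSliding (nums : List (List Int)) : List Int :=
  let pairs := pvPairs nums
  let st := pvLoopA pairs pairs
    ((none : Option (Int × Int)), List.replicate nums.length 0, (nums.length : Int), 0)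
  match st.1 with
  | some (a, b) => [a, b]
  | none => []      -- Python returns the float pair [-inf, inf] here; excluded by Pre_

-- ===== PORT B =====
-- B's `for x, i in pairs` loop: keep the last value seen per list in a dict
def pvLoopB (k : Nat) :
    List (Int × Int) → PySem.Dict Int Int × Option (Int × Int) →
    PySem.Dict Int Int × Option (Int × Int)
  | [], st => st
  | p :: rest, st =>
    let last := st.1.insert p.2 p.1
    let res :=
      if last.size = k then
        -- `min(last.values())`; the dict is nonempty whenever the loop body runs
        pvUpd st.2 ((PySem.List.min? last.values (fun v => v)).getD 0) p.1
      else st.2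
    pvLoopB k rest (last, res)

def smallestRangeSliding_alt (nums : List (List Int)) : List Int :=
  let pairs := pvPairs nums
  let st := pvLoopB nums.length pairs (PySem.Dict.empty, none)
  match st.2 with
  | some (a, b) => [a, b]
  | none => []      -- Python returns the float pair [-inf, inf] here; excluded by Pre_

-- ===== PRECONDITION & SPEC =====
-- Pre_ excludes exactly the inputs (nums empty, or some inner list empty) on which no
-- valid range exists and the Python returns the float sentinels [-inf, inf] — not a
-- value of the declared list-of-int return type.
def Pre_smallestRangeSliding (nums : List (List Int)) : Prop :=
  nums ≠ [] ∧ ∀ l ∈ nums, l ≠ []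
instance (nums : List (List Int)) : Decidable (Pre_smallestRangeSliding nums) := by
  unfold Pre_smallestRangeSliding; infer_instance

def pvWitness_smallestRangeSliding : List (List Int) := [[4, 10, 15, 24, 26], [0, 9, 12, 20], [5, 18, 22, 30]]

def Spec_smallestRangeSliding (nums : List (List Int)) (out : List Int) : Prop := out = smallestRangeSliding_alt nums
instance (nums : List (List Int)) (out : List Int) : Decidable (Spec_smallestRangeSliding nums out) := by unfold Spec_smallestRangeSliding; infer_instance

-- ===== CLAIM (what is proved, stated in full; the proofs are below) =====
def Claim_equal_smallestRangeSliding : Prop := ∀ (nums : List (List Int)), Dom_smallestRangeSliding nums → Pre_smallestRangeSliding nums → Spec_smallestRangeSliding nums (smallestRangeSliding nums)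

-- ===== LEMMAS AND PROOFS =====

-- `occB w j`: does list index j occur among the processed pairs w?
def occB (w : List (Int × Int)) (j : Int) : Bool := w.any (fun p => p.2 == j)

-- all k list indices occur in w
def pvCovers (k : Nat) (w : List (Int × Int)) : Prop := ∀ j : Nat, j < k → occB w (j : Int) = true

-- number of the k list indices that occur in w
def pvNcov (k : Nat) (w : List (Int × Int)) : Nat :=
  ((Finset.range k).filter (fun j => occB w ((j : Nat) : Int) = true)).card

-- the dict of last values per list index built by B
def pvLast (q : List (Int × Int)) : PySem.Dict Int Int :=
  q.foldl (fun d p => d.insert p.2 p.1) PySem.Dict.empty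

-- A's count list matches the multiset of indices in the current window
def pvCntInv (k : Nat) (w : List (Int × Int)) (cnt : List Int) : Prop :=
  cnt.length = k ∧ ∀ j : Nat, j < k → cnt.getD j 0 = (w.countP (fun p => p.2 == (j : Int)) : Int)

-- ---- basic facts about occB / pvCovers / pvNcov ----

theorem pv_occ_append (w : List (Int × Int)) (p : Int × Int) (j : Int) :
    occB (w ++ [p]) j = (occB w j || p.2 == j) := by
  simp [occB]

theorem pv_occ_cons (p : Int × Int) (w : List (Int × Int)) (j : Int) :
    occB (p :: w) j = (p.2 == j || occB w j) := by
  simp [occB]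

theorem pv_occ_of_drop (w : List (Int × Int)) (n : Nat) (j : Int)
    (h : occB (w.drop n) j = true) : occB w j = true := by
  simp only [occB, List.any_eq_true] at h ⊢
  obtain ⟨p, hp, hj⟩ := h
  exact ⟨p, (w.drop_sublist n).mem hp, hj⟩

theorem pv_covers_of_drop_succ (k : Nat) (w : List (Int × Int)) (n m : Nat)
    (hmn : m ≤ n) (h : pvCovers k (w.drop n)) : pvCovers k (w.drop m) := by
  intro j hj
  have h2 := h j hj
  rw [show List.drop n w = List.drop (n - m) (List.drop m w) by rw [List.drop_drop]; congr 1; omega] at h2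
  exact pv_occ_of_drop _ _ _ h2

theorem pv_not_covers_nil (k : Nat) (hk : 0 < k) : ¬ pvCovers k [] := by
  intro h
  have := h 0 hk
  simp [occB] at this

theorem pv_ncov_le (k : Nat) (w : List (Int × Int)) : pvNcov k w ≤ k := by
  calc ((Finset.range k).filter _).card ≤ (Finset.range k).card := Finset.card_filter_le _ _
  _ = k := Finset.card_range k

theorem pv_covers_iff (k : Nat) (w : List (Int × Int)) :
    pvCovers k w ↔ pvNcov k w = k := by
  unfold pvCovers pvNcov
  constructor
  · intro h
    rw [Finset.filter_true_of_mem (by intro j hj; exact h j (Finset.mem_range.mp hj))]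
    exact Finset.card_range k
  · intro h j hj
    have hsub : (Finset.range k).filter (fun j => occB w ((j : Nat) : Int) = true) = Finset.range k := by
      apply Finset.eq_of_subset_of_card_le (Finset.filter_subset _ _)
      rw [h, Finset.card_range]
    have : j ∈ (Finset.range k).filter (fun j => occB w ((j : Nat) : Int) = true) := by
      rw [hsub]; exact Finset.mem_range.mpr hj
    exact (Finset.mem_filter.mp this).2

theorem pv_ncov_append (k : Nat) (w : List (Int × Int)) (x : Int) (j0 : Nat) (hj : j0 < k) :
    pvNcov k (w ++ [(x, (j0 : Int))]) =
      if occB w (j0 : Int) then pvNcov k w else pvNcov k w + 1 := by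
  unfold pvNcov
  have hset : (Finset.range k).filter (fun j => occB (w ++ [(x, (j0 : Int))]) ((j : Nat) : Int) = true)
      = insert j0 ((Finset.range k).filter (fun j => occB w ((j : Nat) : Int) = true)) := by
    ext j
    simp only [Finset.mem_filter, Finset.mem_insert, Finset.mem_range, pv_occ_append,
      Bool.or_eq_true, beq_iff_eq]
    constructor
    · rintro ⟨hjk, h | h⟩
      · exact Or.inr ⟨hjk, h⟩
      · exact Or.inl (by exact_mod_cast h.symm)
    · rintro (rfl | ⟨hjk, h⟩)
      · exact ⟨hj, Or.inr rfl⟩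
      · exact ⟨hjk, Or.inl h⟩
  rw [hset]
  by_cases hocc : occB w (j0 : Int) = true
  · rw [Finset.insert_eq_self.mpr (Finset.mem_filter.mpr ⟨Finset.mem_range.mpr hj, hocc⟩)]
    simp [hocc]
  · rw [Finset.card_insert_of_notMem (by simp [Finset.mem_filter, hocc])]
    simp [hocc]

-- ---- facts about pvLast (B's dict of last values per index) ----

theorem pv_last_append (q : List (Int × Int)) (p : Int × Int) :
    pvLast (q ++ [p]) = (pvLast q).insert p.2 p.1 := by
  simp [pvLast, List.foldl_append]

theorem pv_foldl_insert_nodup (q : List (Int × Int)) :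
    ∀ d : PySem.Dict Int Int, d.keys.Nodup →
      (q.foldl (fun d p => d.insert p.2 p.1) d).keys.Nodup := by
  induction q with
  | nil => intro d h; exact h
  | cons p q ih =>
      intro d h
      exact ih _ (PySem.Dict.nodup_keys_insert d p.2 p.1 h)

theorem pv_last_nodup (q : List (Int × Int)) : (pvLast q).keys.Nodup :=
  pv_foldl_insert_nodup q _ PySem.Dict.nodup_keys_empty

theorem pv_foldl_insert_get? (q : List (Int × Int)) :
    ∀ (d : PySem.Dict Int Int) (j : Int),
      (q.foldl (fun d p => d.insert p.2 p.1) d).get? j =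
        ((q.reverse.find? (fun p => p.2 == j)).map (fun p => p.1)).or (d.get? j) := by
  induction q with
  | nil => intro d j; simp
  | cons p q ih =>
      intro d j
      simp only [List.foldl_cons, List.reverse_cons, List.find?_append]
      rw [ih]
      cases hf : q.reverse.find? (fun p => p.2 == j) with
      | some pw => simp [Option.or]
      | none =>
          simp only [Option.map_none, Option.none_or]
          rw [PySem.Dict.get?_insert]
          by_cases hj : j = p.2
          · simp [hj, List.find?, Option.or]
          · have hb : (p.2 == j) = false := by
              rw [beq_eq_false_iff_ne]
              omega
            simp [hj, List.find?, hb, Option.or]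

theorem pv_last_get? (q : List (Int × Int)) (j : Int) :
    (pvLast q).get? j = (q.reverse.find? (fun p => p.2 == j)).map (fun p => p.1) := by
  rw [pvLast, pv_foldl_insert_get?]
  simp

theorem pv_last_mem_keys (q : List (Int × Int)) (j : Int) :
    j ∈ (pvLast q).keys ↔ occB q j = true := by
  constructor
  · intro h
    by_contra hocc
    have hnone : (pvLast q).get? j = none := by
      rw [pv_last_get?]
      have : q.reverse.find? (fun p => p.2 == j) = none := by
        rw [List.find?_eq_none]
        intro p hp hpj
        exact hocc (by simp only [occB, List.any_eq_true]
                       exact ⟨p, List.mem_reverse.mp hp, hpj⟩)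
      simp [this]
    exact ((PySem.Dict.get?_eq_none_iff_not_mem_keys _ _).mp hnone) h
  · intro h
    by_contra hmem
    have hnone := (PySem.Dict.get?_eq_none_iff_not_mem_keys (pvLast q) j).mpr hmem
    rw [pv_last_get?] at hnone
    simp only [occB, List.any_eq_true] at h
    obtain ⟨p, hp, hpj⟩ := h
    have : q.reverse.find? (fun p => p.2 == j) ≠ none := by
      intro hf
      rw [List.find?_eq_none] at hf
      exact hf p (List.mem_reverse.mpr hp) hpj
    cases hf : q.reverse.find? (fun p => p.2 == j) with
    | none => exact this hf
    | some pw => rw [hf] at hnone; simp at hnone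

theorem pv_size_eq_keys_length (d : PySem.Dict Int Int) : d.size = d.keys.length := by
  simp [PySem.Dict.size, PySem.Dict.keys]

theorem pv_size_iff_covers (k : Nat) (q : List (Int × Int))
    (hidx : ∀ p ∈ q, ∃ j : Nat, j < k ∧ p.2 = (j : Int)) :
    (pvLast q).size = k ↔ pvCovers k q := by
  have hS : ((pvLast q).keys.toFinset : Finset Int).card = (pvLast q).keys.length :=
    List.toFinset_card_of_nodup (pv_last_nodup q)
  have hsub : (pvLast q).keys.toFinset ⊆ (Finset.range k).image (fun j : Nat => (j : Int)) := by
    intro x hx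
    have hocc : occB q x = true := (pv_last_mem_keys q x).mp (List.mem_toFinset.mp hx)
    simp only [occB, List.any_eq_true, beq_iff_eq] at hocc
    obtain ⟨p, hp, rfl⟩ := hocc
    obtain ⟨j, hjk, hj⟩ := hidx p hp
    simp only [Finset.mem_image, Finset.mem_range]
    exact ⟨j, hjk, hj.symm⟩
  have hT : ((Finset.range k).image (fun j : Nat => (j : Int))).card = k := by
    rw [Finset.card_image_of_injective _ Nat.cast_injective, Finset.card_range]
  rw [pv_size_eq_keys_length]
  constructor
  · intro h j hj
    have heq : (pvLast q).keys.toFinset = (Finset.range k).image (fun j : Nat => (j : Int)) := by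
      apply Finset.eq_of_subset_of_card_le hsub
      rw [hT, hS, h]
    have : (j : Int) ∈ (pvLast q).keys.toFinset := by
      rw [heq]
      simp only [Finset.mem_image, Finset.mem_range]
      exact ⟨j, hj, rfl⟩
    exact (pv_last_mem_keys q _).mp (List.mem_toFinset.mp this)
  · intro h
    have hsup : (Finset.range k).image (fun j : Nat => (j : Int)) ⊆ (pvLast q).keys.toFinset := by
      intro x hx
      simp only [Finset.mem_image, Finset.mem_range] at hx
      obtain ⟨j, hj, rfl⟩ := hx
      exact List.mem_toFinset.mpr ((pv_last_mem_keys q _).mpr (h j hj))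
    have := Finset.Subset.antisymm hsub hsup
    rw [← hS, this, hT]

-- once the window [m, …] still covers everything but [m+1, …] does not,
-- min(last.values()) is exactly the value at position m
theorem pv_minlast (k : Nat) (q : List (Int × Int))
    (hsort : q.Pairwise (fun a b => a.1 ≤ b.1))
    (hidx : ∀ p ∈ q, ∃ j : Nat, j < k ∧ p.2 = (j : Int))
    (m : Nat) (hm : m < q.length)
    (hcov : pvCovers k (q.drop m)) (hncov : ¬ pvCovers k (q.drop (m + 1))) :
    PySem.List.min? (pvLast q).values (fun v => v) = some (q[m].1) := by
  have hdropm : q.drop m = q[m] :: q.drop (m + 1) := List.drop_eq_getElem_cons hm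
  -- the index missing from the shorter window is exactly the one at position m
  have hA1 : occB (q.drop (m + 1)) q[m].2 = false := by
    by_contra hocc
    rw [Bool.not_eq_false] at hocc
    apply hncov
    intro j hj
    have h2 := hcov j hj
    rw [hdropm, pv_occ_cons] at h2
    rw [Bool.or_eq_true] at h2
    rcases h2 with h3 | h3
    · rw [beq_iff_eq] at h3
      rw [← h3]
      exact hocc
    · exact h3
  -- so position m is the last occurrence of its index, and its value is in the dict
  have hfind : q.reverse.find? (fun p => p.2 == q[m].2) = some q[m] := by
    have hrev : q.reverse = (q.drop (m + 1)).reverse ++ (q.take (m + 1)).reverse := by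
      rw [← List.reverse_append, List.take_append_drop]
    rw [hrev, List.find?_append]
    have h1 : (q.drop (m + 1)).reverse.find? (fun p => p.2 == q[m].2) = none := by
      rw [List.find?_eq_none]
      intro p hp hpj
      have : occB (q.drop (m + 1)) q[m].2 = true := by
        simp only [occB, List.any_eq_true]
        exact ⟨p, List.mem_reverse.mp hp, hpj⟩
      rw [hA1] at this
      exact absurd this (by simp)
    rw [h1]
    have htake : q.take (m + 1) = q.take m ++ [q[m]] := by
      rw [List.take_add_one]
      simp [List.getElem?_eq_getElem hm]
    rw [htake, List.reverse_append]
    simp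
  have hget : (pvLast q).get? q[m].2 = some q[m].1 := by
    rw [pv_last_get?, hfind]
    rfl
  have hmemval : q[m].1 ∈ (pvLast q).values := by
    have hit := PySem.Dict.mem_items_of_get?_eq_some _ hget
    simp only [PySem.Dict.values, List.mem_map]
    exact ⟨(q[m].2, q[m].1), hit, rfl⟩
  -- every stored last value sits at a position ≥ m, hence is ≥ the value at m
  have hlb : ∀ w ∈ (pvLast q).values, q[m].1 ≤ w := by
    intro w hw
    simp only [PySem.Dict.values, List.mem_map] at hw
    obtain ⟨pr, hpr, hprw⟩ := hw
    obtain ⟨pk, pv⟩ := pr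
    simp only at hprw
    have hget2 := PySem.Dict.get?_of_mem_items (pvLast q) hpr (pv_last_nodup q)
    rw [pv_last_get?] at hget2
    cases hf : q.reverse.find? (fun p => p.2 == pk) with
    | none => rw [hf] at hget2; simp at hget2
    | some pw =>
      rw [hf] at hget2
      simp only [Option.map_some, Option.some.injEq] at hget2
      obtain ⟨hpred, as, bs, hdec, hnb⟩ := List.find?_eq_some_iff_append.mp hf
      rw [beq_iff_eq] at hpred
      have hq2 : q = bs.reverse ++ pw :: as.reverse := by
        have h5 := congrArg List.reverse hdec
        simpa [List.reverse_append] using h5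
      have htlen : bs.reverse.length < q.length := by
        rw [hq2]; simp [List.length_append]
      have hqt : q[bs.reverse.length]'htlen = pw := by
        rw [List.getElem_of_eq hq2]
        rw [List.getElem_append_right (le_refl _)]
        simp
      have hq3 : q = (bs.reverse ++ [pw]) ++ as.reverse := by
        rw [hq2]; simp
      have hafter : ∀ u (hu : u < q.length), bs.reverse.length < u → q[u].2 ≠ pk := by
        intro u hu hlt
        have hmem : q[u] ∈ as.reverse := by
          have h6 : q[u] = ((bs.reverse ++ [pw]) ++ as.reverse)[u]'(by rw [← hq3]; exact hu) :=
            List.getElem_of_eq hq3 hu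
          rw [h6, List.getElem_append_right (by have h6b := hlt; simp at h6b ⊢; omega)]
          exact List.getElem_mem _
        have h7 := hnb _ (List.mem_reverse.mp hmem)
        simp only [Bool.not_eq_eq_eq_not, Bool.not_true, beq_eq_false_iff_ne] at h7
        exact h7
      have hkey : ∃ j1 : Nat, j1 < k ∧ pk = (j1 : Int) := by
        have hks := PySem.Dict.mem_keys_of_mem_items _ hpr
        have hocc := (pv_last_mem_keys q pk).mp hks
        simp only [occB, List.any_eq_true, beq_iff_eq] at hocc
        obtain ⟨p, hp, hpj⟩ := hocc
        obtain ⟨j1, hj1k, hj1⟩ := hidx p hp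
        exact ⟨j1, hj1k, by rw [← hpj, hj1]⟩
      obtain ⟨j1, hj1k, hj1⟩ := hkey
      have hocc2 := hcov j1 hj1k
      simp only [occB, List.any_eq_true, beq_iff_eq] at hocc2
      obtain ⟨y, hy, hyj⟩ := hocc2
      obtain ⟨v, hv, hyv⟩ := List.mem_iff_getElem.mp hy
      have hu : m + v < q.length := by
        have := hv; simp [List.length_drop] at this; omega
      have hque : q[m + v].2 = pk := by
        rw [List.getElem_drop] at hyv
        rw [← hyv] at hyj
        rw [hyj, hj1]
      have hut : m + v ≤ bs.reverse.length := by
        by_contra h9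
        exact hafter (m + v) hu (by omega) hque
      have hmono : q[m].1 ≤ (q[bs.reverse.length]'htlen).1 := by
        rcases Nat.lt_or_ge m bs.reverse.length with h10 | h10
        · exact (List.pairwise_iff_getElem.mp hsort) m bs.reverse.length hm htlen h10
        · have : m = bs.reverse.length := by omega
          subst this; exact le_refl _
      rw [hqt] at hmono
      rw [← hprw, ← hget2]
      exact hmono
  cases hmin : PySem.List.min? (pvLast q).values (fun v => v) with
  | none =>
      rw [PySem.List.min?_eq_none_iff] at hmin
      rw [hmin] at hmemval
      exact absurd hmemval (by simp)
  | some mv =>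
      have h1 := PySem.List.min?_isMin hmin _ hmemval
      have h2 := hlb mv (PySem.List.min?_mem hmin)
      rw [le_antisymm h1 h2]

-- ---- facts about pvUpd ----

theorem pv_upd_shape (res : Option (Int × Int)) (l r : Int) :
    ∃ a b, pvUpd res l r = some (a, b) ∧ b - a ≤ r - l := by
  cases res with
  | none => exact ⟨l, r, rfl, by omega⟩
  | some ab =>
      obtain ⟨a, b⟩ := ab
      by_cases h : r - l < b - a
      · exact ⟨l, r, by simp [pvUpd, h], by omega⟩
      · exact ⟨a, b, by simp [pvUpd, h], by omega⟩

theorem pv_upd_skip (a b l r : Int) (hw : b - a ≤ r - l) :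
    pvUpd (some (a, b)) l r = some (a, b) := by
  simp [pvUpd]
  omega

theorem pv_upd2 (res : Option (Int × Int)) (l l' r : Int) (h : l ≤ l') :
    pvUpd (pvUpd res l r) l' r = pvUpd res l' r := by
  cases res with
  | none =>
      show pvUpd (some (l, r)) l' r = some (l', r)
      simp only [pvUpd]
      split_ifs with h1
      · rfl
      · have : l = l' := by omega
        rw [this]
  | some ab =>
      obtain ⟨a, b⟩ := ab
      by_cases h1 : r - l < b - a
      · have e1 : pvUpd (some (a, b)) l r = some (l, r) := by simp [pvUpd, h1]
        rw [e1]
        simp only [pvUpd]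
        split_ifs with h2 h3 h3
        · rfl
        · exfalso; omega
        · have : l = l' := by omega
          rw [this]
        · exfalso; omega
      · have e1 : pvUpd (some (a, b)) l r = some (a, b) := by simp [pvUpd, h1]
        rw [e1]

-- ---- facts about pvPairs ----

theorem pv_insertBy_pairwise (x : Int × Int) (ys : List (Int × Int))
    (h : ys.Pairwise (fun a b => a.1 ≤ b.1)) :
    (PySem.List.insertBy
        (fun a b : Int × Int => decide (a.1 < b.1) || !decide (b.1 < a.1) && decide (a.2 < b.2))
        x ys).Pairwise (fun a b => a.1 ≤ b.1) := by
  induction ys with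
  | nil => simp [PySem.List.insertBy.eq_def]
  | cons y ys ih =>
      rw [PySem.List.insertBy.eq_2]
      rcases List.pairwise_cons.mp h with ⟨hy, hys⟩
      split_ifs with hb
    <;> [skip; skip]
      · -- x goes first: x.1 ≤ y.1 and by transitivity x.1 ≤ every later value
        simp only [Bool.or_eq_true, Bool.and_eq_true, decide_eq_true_eq, Bool.not_eq_true',
          decide_eq_false_iff_not] at hb
        have hxy : x.1 ≤ y.1 := by rcases hb with h1 | ⟨h1, _⟩ <;> omega
        refine List.pairwise_cons.mpr ⟨?_, h⟩
        intro z hz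
        rcases List.mem_cons.mp hz with rfl | hz
        · exact hxy
        · exact le_trans hxy (hy z hz)
      · -- y stays first: y.1 ≤ x.1 and y.1 ≤ everything already in ys
        simp only [Bool.or_eq_true, Bool.and_eq_true, decide_eq_true_eq, Bool.not_eq_true',
          decide_eq_false_iff_not] at hb
        have hyx : y.1 ≤ x.1 := by omega
        refine List.pairwise_cons.mpr ⟨?_, ih hys⟩
        intro z hz
        rcases (PySem.List.mem_insertBy _ _ _ _).mp hz with rfl | hz
        · exact hyx
        · exact hy z hz

theorem pv_foldl_insertBy_pairwise (xs : List (Int × Int)) :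
    ∀ acc : List (Int × Int), acc.Pairwise (fun a b => a.1 ≤ b.1) →
      (xs.foldl (fun acc x => PySem.List.insertBy
        (fun a b : Int × Int => decide (a.1 < b.1) || !decide (b.1 < a.1) && decide (a.2 < b.2))
        x acc) acc).Pairwise (fun a b => a.1 ≤ b.1) := by
  induction xs with
  | nil => intro acc h; exact h
  | cons x xs ih => intro acc h; exact ih _ (pv_insertBy_pairwise x acc h)

theorem pv_pairs_sorted (nums : List (List Int)) :
    (pvPairs nums).Pairwise (fun a b => a.1 ≤ b.1) := by
  unfold pvPairs PySem.List.sorted2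
  exact pv_foldl_insertBy_pairwise _ [] (by simp)

theorem pv_pairs_idx (nums : List (List Int)) :
    ∀ p ∈ pvPairs nums, ∃ j : Nat, j < nums.length ∧ p.2 = (j : Int) := by
  intro p hp
  have hmem : p ∈ (PySem.List.enumerate nums).flatMap (fun ia => ia.2.map (fun x => (x, ia.1))) :=
    (PySem.List.sorted2_perm _ _ _ _).mem_iff.mp hp
  rw [List.mem_flatMap] at hmem
  obtain ⟨ia, hia, hpin⟩ := hmem
  rw [PySem.List.mem_enumerate_iff] at hia
  obtain ⟨j, hj, rfl⟩ := hia
  rw [List.mem_map] at hpin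
  obtain ⟨x, _, rfl⟩ := hpin
  exact ⟨j, hj, by simp⟩

-- ---- the inner while-loop of A ----

theorem pv_inner_stop (P : List (Int × Int)) (r : Int) (fuel : Nat) (res : Option (Int × Int))
    (cnt : List Int) (empty left : Int) (h : ¬ empty = 0) :
    pvInnerA P r fuel res cnt empty left = (res, cnt, empty, left) := by
  cases fuel with
  | zero => rfl
  | succ fuel => simp [pvInnerA, h]

theorem pv_ncov_cons (k : Nat) (p : Int × Int) (w : List (Int × Int)) :
    pvNcov k (p :: w) = pvNcov k (w ++ [p]) := by
  unfold pvNcov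
  congr 1
  apply Finset.filter_congr
  intro j _
  simp [pv_occ_cons, pv_occ_append, Bool.or_comm]

theorem pv_count_zero_iff (w : List (Int × Int)) (j : Int) :
    w.countP (fun p => p.2 == j) = 0 ↔ occB w j = false := by
  rw [List.countP_eq_zero]
  simp [occB]

-- running A's inner while-loop from a covering window pops up to (and including) the
-- first position whose removal breaks coverage, and nets a single pvUpd with the
-- value at the last popped position
theorem pv_inner_loop (k : Nat) (hk : 0 < k) (P q' rest' : List (Int × Int))
    (hP : P = q' ++ rest')
    (hsort : q'.Pairwise (fun a b => a.1 ≤ b.1))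
    (hidx : ∀ p ∈ q', ∃ j : Nat, j < k ∧ p.2 = (j : Int))
    (x : Int) :
    ∀ (fuel : Nat) (res : Option (Int × Int)) (cnt : List Int) (leftN : Nat),
      leftN ≤ q'.length →
      pvCntInv k (q'.drop leftN) cnt →
      pvCovers k (q'.drop leftN) →
      q'.length - leftN ≤ fuel →
      ∃ (leftN' : Nat) (cnt' : List Int) (hl' : leftN' - 1 < q'.length),
        leftN < leftN' ∧ leftN' ≤ q'.length ∧
        (∀ m : Nat, leftN ≤ m → m < leftN' → pvCovers k (q'.drop m)) ∧
        ¬ pvCovers k (q'.drop leftN') ∧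
        pvCntInv k (q'.drop leftN') cnt' ∧
        pvInnerA P x fuel res cnt ((k : Int) - pvNcov k (q'.drop leftN)) (leftN : Int)
          = (pvUpd res (q'[leftN' - 1]'hl').1 x, cnt',
             (k : Int) - pvNcov k (q'.drop leftN'), ((leftN' : Nat) : Int)) := by
  subst hP
  intro fuel
  induction fuel with
  | zero =>
      intro res cnt leftN hle hcnt hcov hfuel
      exfalso
      have hlen : leftN = q'.length := by omega
      rw [hlen, List.drop_length] at hcov
      exact pv_not_covers_nil k hk hcov
  | succ fuel ih =>
      intro res cnt leftN hle hcnt hcov hfuel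
      have hlt : leftN < q'.length := by
        rcases Nat.lt_or_ge leftN q'.length with h | h
        · exact h
        · exfalso
          have hlen : leftN = q'.length := by omega
          rw [hlen, List.drop_length] at hcov
          exact pv_not_covers_nil k hk hcov
      have hdropm : q'.drop leftN = q'[leftN] :: q'.drop (leftN + 1) := List.drop_eq_getElem_cons hlt
      obtain ⟨j0, hj0k, hj0⟩ := hidx q'[leftN] (List.getElem_mem hlt)
      have hempty : (k : Int) - pvNcov k (q'.drop leftN) = 0 := by
        rw [(pv_covers_iff _ _).mp hcov]
        omega
      have hli : PySem.List.pyGetD (q' ++ rest') (leftN : Int) (0, 0) = q'[leftN] := by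
        rw [PySem.List.pyGetD_natCast]
        have hPl : leftN < (q' ++ rest').length := by simp; omega
        rw [List.getD_eq_getElem _ _ hPl, List.getElem_append_left hlt]
      obtain ⟨hcl, hcv⟩ := hcnt
      have hcget : PySem.List.pyGetD cnt q'[leftN].2 0
          = ((q'.drop leftN).countP (fun p => p.2 == ((j0 : Nat) : Int)) : Int) := by
        rw [hj0, PySem.List.pyGetD_natCast]
        exact hcv j0 hj0k
      have hcount_split : (q'.drop leftN).countP (fun p => p.2 == ((j0 : Nat) : Int))
          = (q'.drop (leftN + 1)).countP (fun p => p.2 == ((j0 : Nat) : Int)) + 1 := by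
        rw [hdropm, List.countP_cons_of_pos]
        simp [hj0]
      -- the updated count list matches the shorter window
      have hj0cl : j0 < cnt.length := by omega
      have hcnt2inv : pvCntInv k (q'.drop (leftN + 1))
          (PySem.List.pySetD cnt q'[leftN].2 (PySem.List.pyGetD cnt q'[leftN].2 0 - 1)) := by
        constructor
        · rw [hj0, PySem.List.length_pySetD]
          exact hcl
        · intro j hj
          have hbr : (PySem.List.pySetD cnt q'[leftN].2 (PySem.List.pyGetD cnt q'[leftN].2 0 - 1)).getD j 0
              = PySem.List.pyGetD (PySem.List.pySetD cnt ((j0 : Nat) : Int) (PySem.List.pyGetD cnt q'[leftN].2 0 - 1)) ((j : Nat) : Int) 0 := by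
            rw [← hj0, PySem.List.pyGetD_natCast]
          rw [hbr, PySem.List.pyGetD_pySetD_natCast cnt j0 j _ 0 hj0cl]
          by_cases hjj : j = j0
          · rw [if_pos hjj, hcget, hjj, hcount_split]
            push_cast
            ring
          · rw [if_neg hjj, PySem.List.pyGetD_natCast]
            rw [hcv j hj, hdropm, List.countP_cons_of_neg]
            simp only [hj0, beq_iff_eq]
            intro hcontra
            exact hjj (by exact_mod_cast hcontra.symm)
      have hc2get : PySem.List.pyGetD (PySem.List.pySetD cnt q'[leftN].2 (PySem.List.pyGetD cnt q'[leftN].2 0 - 1)) q'[leftN].2 0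
          = ((q'.drop (leftN + 1)).countP (fun p => p.2 == ((j0 : Nat) : Int)) : Int) := by
        calc PySem.List.pyGetD (PySem.List.pySetD cnt q'[leftN].2 (PySem.List.pyGetD cnt q'[leftN].2 0 - 1)) q'[leftN].2 0
            = (PySem.List.pySetD cnt q'[leftN].2 (PySem.List.pyGetD cnt q'[leftN].2 0 - 1)).getD j0 0 := by
              rw [hj0, PySem.List.pyGetD_natCast]
          _ = _ := hcnt2inv.2 j0 hj0k
      have hncov_rel : pvNcov k (q'.drop leftN)
          = if occB (q'.drop (leftN + 1)) ((j0 : Nat) : Int)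
            then pvNcov k (q'.drop (leftN + 1)) else pvNcov k (q'.drop (leftN + 1)) + 1 := by
        rw [hdropm, pv_ncov_cons]
        rw [show q'[leftN] = (q'[leftN].1, ((j0 : Nat) : Int)) from Prod.ext rfl hj0]
        exact pv_ncov_append k _ _ j0 hj0k
      -- one unfolding of the loop
      have hstep : pvInnerA (q' ++ rest') x (fuel + 1) res cnt ((k : Int) - pvNcov k (q'.drop leftN)) (leftN : Int)
          = pvInnerA (q' ++ rest') x fuel (pvUpd res q'[leftN].1 x)
              (PySem.List.pySetD cnt q'[leftN].2 (PySem.List.pyGetD cnt q'[leftN].2 0 - 1))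
              (if PySem.List.pyGetD (PySem.List.pySetD cnt q'[leftN].2 (PySem.List.pyGetD cnt q'[leftN].2 0 - 1)) q'[leftN].2 0 = 0
               then ((k : Int) - pvNcov k (q'.drop leftN)) + 1 else ((k : Int) - pvNcov k (q'.drop leftN)))
              ((leftN : Int) + 1) := by
        rw [pvInnerA, if_pos hempty, hli]
      by_cases hcov2 : pvCovers k (q'.drop (leftN + 1))
      · -- the shorter window still covers: keep popping
        have hocc2 : occB (q'.drop (leftN + 1)) ((j0 : Nat) : Int) = true := hcov2 j0 hj0k
        have hczero : ¬ PySem.List.pyGetD (PySem.List.pySetD cnt q'[leftN].2 (PySem.List.pyGetD cnt q'[leftN].2 0 - 1)) q'[leftN].2 0 = 0 := by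
          rw [hc2get]
          intro hcontra
          have h0 : (q'.drop (leftN + 1)).countP (fun p => p.2 == ((j0 : Nat) : Int)) = 0 := by
            exact_mod_cast hcontra
          rw [pv_count_zero_iff] at h0
          rw [h0] at hocc2
          exact absurd hocc2 (by simp)
        obtain ⟨leftN', cnt', hl', h1, h2, h3, h4, h5, h6⟩ :=
          ih (pvUpd res q'[leftN].1 x)
            (PySem.List.pySetD cnt q'[leftN].2 (PySem.List.pyGetD cnt q'[leftN].2 0 - 1))
            (leftN + 1) (by omega) hcnt2inv hcov2 (by omega)
        refine ⟨leftN', cnt', hl', by omega, h2, ?_, h4, h5, ?_⟩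
        · intro m hm1 hm2
          rcases Nat.lt_or_ge m (leftN + 1) with h7 | h7
          · have : m = leftN := by omega
            rw [this]
            exact hcov
          · exact h3 m h7 hm2
        · rw [hstep, if_neg hczero]
          have hemp2 : (k : Int) - pvNcov k (q'.drop leftN) = (k : Int) - pvNcov k (q'.drop (leftN + 1)) := by
            rw [hncov_rel, if_pos hocc2]
          rw [hemp2]
          rw [show ((leftN : Int) + 1) = (((leftN + 1 : Nat)) : Int) by push_cast; ring]
          rw [h6]
          congr 1
          have hmono : q'[leftN].1 ≤ (q'[leftN' - 1]'hl').1 := by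
            rcases Nat.lt_or_ge leftN (leftN' - 1) with h8 | h8
            · exact (List.pairwise_iff_getElem.mp hsort) leftN (leftN' - 1) hlt hl' h8
            · have h9 : leftN = leftN' - 1 := by omega
              subst h9
              exact le_refl _
          exact pv_upd2 res q'[leftN].1 _ x hmono
      · -- removing position leftN breaks coverage: the loop stops here
        have hocc2 : occB (q'.drop (leftN + 1)) ((j0 : Nat) : Int) = false := by
          by_contra h7
          rw [Bool.not_eq_false] at h7
          apply hcov2
          intro j hj
          have h8 := hcov j hj
          rw [hdropm, pv_occ_cons, Bool.or_eq_true] at h8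
          rcases h8 with h9 | h9
          · rw [beq_iff_eq] at h9
            rw [hj0] at h9
            rw [show ((j : Nat) : Int) = ((j0 : Nat) : Int) from h9.symm]
            exact h7
          · exact h9
        have hczero : PySem.List.pyGetD (PySem.List.pySetD cnt q'[leftN].2 (PySem.List.pyGetD cnt q'[leftN].2 0 - 1)) q'[leftN].2 0 = 0 := by
          rw [hc2get]
          have h0 : (q'.drop (leftN + 1)).countP (fun p => p.2 == ((j0 : Nat) : Int)) = 0 :=
            (pv_count_zero_iff _ _).mpr hocc2
          rw [h0]
          rfl
        have hemp2 : ((k : Int) - pvNcov k (q'.drop leftN)) + 1 = (k : Int) - pvNcov k (q'.drop (leftN + 1)) := by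
          rw [hncov_rel, if_neg (by rw [hocc2]; simp)]
          push_cast
          ring
        refine ⟨leftN + 1, _, by omega, by omega, by omega, ?_, ?_, hcnt2inv, ?_⟩
        · intro m hm1 hm2
          have : m = leftN := by omega
          rw [this]
          exact hcov
        · intro h7
          apply hcov2
          intro j hj
          exact h7 j hj
        · rw [hstep, if_pos hczero, hemp2, pv_inner_stop]
          · simp only [Nat.add_sub_cancel]
            rw [show ((leftN : Int) + 1) = (((leftN + 1 : Nat)) : Int) by push_cast; ring]
          · rw [← hemp2]
            have h10 : pvNcov k (q'.drop leftN) = k := (pv_covers_iff _ _).mp hcov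
            rw [h10]
            omega

theorem pv_covers_append (k : Nat) (w : List (Int × Int)) (p : Int × Int)
    (h : pvCovers k w) : pvCovers k (w ++ [p]) := by
  intro j hj
  rw [pv_occ_append, h j hj]
  rfl

-- the outer loops of A and B, run in lockstep
theorem pv_main (k : Nat) (hk : 0 < k) (P : List (Int × Int))
    (hsort : P.Pairwise (fun a b => a.1 ≤ b.1))
    (hidx : ∀ p ∈ P, ∃ j : Nat, j < k ∧ p.2 = (j : Int)) :
    ∀ (rest q : List (Int × Int)) (res : Option (Int × Int)) (cnt : List Int) (leftN : Nat),
      P = q ++ rest →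
      leftN ≤ q.length →
      pvCntInv k (q.drop leftN) cnt →
      (∀ m : Nat, m < leftN → pvCovers k (q.drop m)) →
      ¬ pvCovers k (q.drop leftN) →
      (pvCovers k q → ∃ (a b : Int) (hq : q ≠ []) (hl : leftN - 1 < q.length), res = some (a, b) ∧ leftN ≠ 0 ∧
         b - a ≤ (q.getLast hq).1 - (q[leftN - 1]'hl).1) →
      (pvLoopA P rest (res, cnt, (k : Int) - pvNcov k (q.drop leftN), (leftN : Int))).1
        = (pvLoopB k rest (pvLast q, res)).2 := by
  intro rest
  induction rest with
  | nil =>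
      intro q res cnt leftN _ _ _ _ _ _
      simp [pvLoopA, pvLoopB]
  | cons p rest' ih =>
      obtain ⟨x, i⟩ := p
      intro q res cnt leftN hP hle hcnt hcovm hncov hres
      have hmemP : ((x, i) : Int × Int) ∈ P := by
        rw [hP]
        exact List.mem_append_right _ (List.mem_cons_self)
      obtain ⟨j0, hj0k, hj0⟩ := hidx _ hmemP
      simp only at hj0
      subst hj0
      have hP' : P = (q ++ [(x, ((j0 : Nat) : Int))]) ++ rest' := by
        rw [hP, List.append_cons]
      have hsort' : (q ++ [(x, ((j0 : Nat) : Int))]).Pairwise (fun a b => a.1 ≤ b.1) := by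
        refine hsort.sublist ?_
        rw [hP']
        exact List.sublist_append_left _ _
      have hidx' : ∀ p ∈ q ++ [(x, ((j0 : Nat) : Int))], ∃ j : Nat, j < k ∧ p.2 = (j : Int) := by
        intro p hp
        exact hidx p (by rw [hP']; exact List.mem_append_left _ hp)
      have hxmax : ∀ p ∈ q, p.1 ≤ x := by
        intro p hp
        exact (List.pairwise_append.mp hsort').2.2 p hp _ (List.mem_singleton.mpr rfl)
      have hdropq' : ∀ m : Nat, m ≤ q.length →
          (q ++ [(x, ((j0 : Nat) : Int))]).drop m = q.drop m ++ [(x, ((j0 : Nat) : Int))] := by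
        intro m hm
        rw [List.drop_append_of_le_length hm]
      obtain ⟨hcl, hcv⟩ := hcnt
      have hcget : PySem.List.pyGetD cnt ((j0 : Nat) : Int) 0
          = ((q.drop leftN).countP (fun pp => pp.2 == ((j0 : Nat) : Int)) : Int) := by
        rw [PySem.List.pyGetD_natCast]
        exact hcv j0 hj0k
      have hj0cl : j0 < cnt.length := by omega
      have hcnt1 : pvCntInv k ((q ++ [(x, ((j0 : Nat) : Int))]).drop leftN)
          (PySem.List.pySetD cnt ((j0 : Nat) : Int) (PySem.List.pyGetD cnt ((j0 : Nat) : Int) 0 + 1)) := by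
        constructor
        · rw [PySem.List.length_pySetD]
          exact hcl
        · intro j hj
          rw [show (PySem.List.pySetD cnt ((j0 : Nat) : Int) (PySem.List.pyGetD cnt ((j0 : Nat) : Int) 0 + 1)).getD j 0
              = PySem.List.pyGetD (PySem.List.pySetD cnt ((j0 : Nat) : Int) (PySem.List.pyGetD cnt ((j0 : Nat) : Int) 0 + 1)) ((j : Nat) : Int) 0
              from (PySem.List.pyGetD_natCast _ _ _).symm]
          rw [PySem.List.pyGetD_pySetD_natCast cnt j0 j _ 0 hj0cl]
          rw [hdropq' leftN hle, List.countP_append]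
          by_cases hjj : j = j0
          · rw [if_pos hjj, hcget, hjj]
            simp only [List.countP_cons, List.countP_nil]
            push_cast
            simp
          · rw [if_neg hjj, PySem.List.pyGetD_natCast, hcv j hj]
            have hz : ([(x, ((j0 : Nat) : Int))].countP (fun pp => pp.2 == ((j : Nat) : Int))) = 0 := by
              have hne2 : ¬ (((j0 : Nat) : Int) = ((j : Nat) : Int)) := by
                intro hcontra
                exact hjj (by exact_mod_cast hcontra.symm)
              simp [hne2]
            rw [hz]
            simp
      have hemp1 : (if PySem.List.pyGetD cnt ((j0 : Nat) : Int) 0 = 0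
            then ((k : Int) - pvNcov k (q.drop leftN)) - 1 else ((k : Int) - pvNcov k (q.drop leftN)))
          = (k : Int) - pvNcov k ((q ++ [(x, ((j0 : Nat) : Int))]).drop leftN) := by
        rw [hdropq' leftN hle, pv_ncov_append k _ x j0 hj0k]
        by_cases hocc : occB (q.drop leftN) ((j0 : Nat) : Int) = true
        · rw [if_pos hocc]
          have hnz : ¬ PySem.List.pyGetD cnt ((j0 : Nat) : Int) 0 = 0 := by
            rw [hcget]
            intro hcontra
            have h0 : (q.drop leftN).countP (fun pp => pp.2 == ((j0 : Nat) : Int)) = 0 := by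
              exact_mod_cast hcontra
            rw [pv_count_zero_iff] at h0
            rw [h0] at hocc
            exact absurd hocc (by simp)
          rw [if_neg hnz]
        · rw [if_neg hocc]
          have hz : PySem.List.pyGetD cnt ((j0 : Nat) : Int) 0 = 0 := by
            rw [hcget]
            have h0 : (q.drop leftN).countP (fun pp => pp.2 == ((j0 : Nat) : Int)) = 0 :=
              (pv_count_zero_iff _ _).mpr (by simpa using hocc)
            rw [h0]
            rfl
          rw [if_pos hz]
          push_cast
          ring
      have hstepA : pvLoopA P ((x, ((j0 : Nat) : Int)) :: rest')
            (res, cnt, (k : Int) - pvNcov k (q.drop leftN), (leftN : Int))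
          = pvLoopA P rest'
              (pvInnerA P x (P.length + 1) res
                (PySem.List.pySetD cnt ((j0 : Nat) : Int) (PySem.List.pyGetD cnt ((j0 : Nat) : Int) 0 + 1))
                ((k : Int) - pvNcov k ((q ++ [(x, ((j0 : Nat) : Int))]).drop leftN)) (leftN : Int)) := by
        simp only [pvLoopA]
        rw [hemp1]
      have hstepB : pvLoopB k ((x, ((j0 : Nat) : Int)) :: rest') (pvLast q, res)
          = pvLoopB k rest' (pvLast (q ++ [(x, ((j0 : Nat) : Int))]),
              if (pvLast (q ++ [(x, ((j0 : Nat) : Int))])).size = k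
              then pvUpd res ((PySem.List.min? (pvLast (q ++ [(x, ((j0 : Nat) : Int))])).values (fun v => v)).getD 0) x
              else res) := by
        simp only [pvLoopB]
        rw [pv_last_append]
      rw [hstepA, hstepB]
      have hsize_iff := pv_size_iff_covers k (q ++ [(x, ((j0 : Nat) : Int))]) hidx'
      by_cases hC : pvCovers k ((q ++ [(x, ((j0 : Nat) : Int))]).drop leftN)
      · -- the new element completes the window: A pops, B records the same candidate
        obtain ⟨leftN', cnt', hl', h1, h2, h3, h4, h5, h6⟩ :=
          pv_inner_loop k hk P (q ++ [(x, ((j0 : Nat) : Int))]) rest' hP' hsort' hidx' x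
            (P.length + 1) res
            (PySem.List.pySetD cnt ((j0 : Nat) : Int) (PySem.List.pyGetD cnt ((j0 : Nat) : Int) 0 + 1))
            leftN (by simp; omega) hcnt1 hC (by rw [hP']; simp; omega)
        rw [h6]
        have hcovq' : pvCovers k (q ++ [(x, ((j0 : Nat) : Int))]) := by
          have := pv_covers_of_drop_succ k (q ++ [(x, ((j0 : Nat) : Int))]) leftN 0 (by omega) hC
          simpa using this
        rw [if_pos (hsize_iff.mpr hcovq')]
        have hmin := pv_minlast k (q ++ [(x, ((j0 : Nat) : Int))]) hsort' hidx' (leftN' - 1) hl'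
          (h3 (leftN' - 1) (by omega) (by omega))
          (by rw [show leftN' - 1 + 1 = leftN' by omega]; exact h4)
        rw [hmin]
        simp only [Option.getD_some]
        apply ih (q ++ [(x, ((j0 : Nat) : Int))]) _ cnt' leftN' hP' h2 h5 ?_ h4 ?_
        · intro m hm
          rcases Nat.lt_or_ge m leftN with h7 | h7
          · rw [hdropq' m (by omega)]
            exact pv_covers_append k _ _ (hcovm m h7)
          · exact h3 m h7 hm
        · intro _
          obtain ⟨a, b, heq, hw⟩ := pv_upd_shape res ((q ++ [(x, ((j0 : Nat) : Int))])[leftN' - 1]'hl').1 x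
          refine ⟨a, b, by simp, by simpa using hl', heq, by omega, ?_⟩
          have hlast : ((q ++ [(x, ((j0 : Nat) : Int))]).getLast (by simp)).1 = x := by
            rw [List.getLast_concat]
          rw [hlast]
          exact hw
      · -- still not covering from `left`: A's inner loop does not run
        have hnz : ¬ ((k : Int) - pvNcov k ((q ++ [(x, ((j0 : Nat) : Int))]).drop leftN) = 0) := by
          have hne : pvNcov k ((q ++ [(x, ((j0 : Nat) : Int))]).drop leftN) ≠ k := by
            intro h7
            exact hC ((pv_covers_iff _ _).mpr h7)
          have hlek := pv_ncov_le k ((q ++ [(x, ((j0 : Nat) : Int))]).drop leftN)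
          omega
        rw [pv_inner_stop _ _ _ _ _ _ _ hnz]
        have hln0 : leftN ≠ 0 → pvCovers k q := by
          intro h7
          have := hcovm 0 (by omega)
          simpa using this
        have hresb : pvCovers k (q ++ [(x, ((j0 : Nat) : Int))]) →
            ∃ (a b : Int) (hq : q ++ [(x, ((j0 : Nat) : Int))] ≠ []) (hl : leftN - 1 < (q ++ [(x, ((j0 : Nat) : Int))]).length),
              res = some (a, b) ∧ leftN ≠ 0 ∧
              b - a ≤ ((q ++ [(x, ((j0 : Nat) : Int))]).getLast hq).1 - ((q ++ [(x, ((j0 : Nat) : Int))])[leftN - 1]'hl).1 := by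
          intro hcovq'
          have hleft1 : leftN ≠ 0 := by
            intro h7
            apply hC
            rw [h7, List.drop_zero]
            exact hcovq'
          have hcovq : pvCovers k q := hln0 hleft1
          obtain ⟨a, b, hqne, hlq, hreseq, _, hbound⟩ := hres hcovq
          have hgl : ((q ++ [(x, ((j0 : Nat) : Int))]).getLast (by simp)).1 = x := by
            rw [List.getLast_concat]
          have hgetl : ((q ++ [(x, ((j0 : Nat) : Int))])[leftN - 1]'(by simp; omega)) = q[leftN - 1]'hlq :=
            List.getElem_append_left hlq
          refine ⟨a, b, by simp, by simp; omega, hreseq, hleft1, ?_⟩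
          rw [hgl, hgetl]
          have hglq : (q.getLast hqne).1 ≤ x := hxmax _ (List.getLast_mem hqne)
          omega
        by_cases hcovq' : pvCovers k (q ++ [(x, ((j0 : Nat) : Int))])
        · rw [if_pos (hsize_iff.mpr hcovq')]
          obtain ⟨a, b, hqne2, hlq2, hreseq, hleft1, hbound2⟩ := hresb hcovq'
          have hmin := pv_minlast k (q ++ [(x, ((j0 : Nat) : Int))]) hsort' hidx' (leftN - 1) hlq2
            (by rw [hdropq' (leftN - 1) (by omega)]
                exact pv_covers_append k _ _ (hcovm (leftN - 1) (by omega)))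
            (by rw [show leftN - 1 + 1 = leftN by omega]; exact hC)
          rw [hmin]
          simp only [Option.getD_some]
          have hskip : pvUpd res ((q ++ [(x, ((j0 : Nat) : Int))])[leftN - 1]'hlq2).1 x = res := by
            rw [hreseq, pv_upd_skip]
            have hgl2 : ((q ++ [(x, ((j0 : Nat) : Int))]).getLast hqne2).1 = x := by
              rw [List.getLast_concat]
            rw [hgl2] at hbound2
            exact hbound2
          rw [hskip]
          exact ih (q ++ [(x, ((j0 : Nat) : Int))]) res _ leftN hP' (by simp; omega) hcnt1
            (fun m hm => by rw [hdropq' m (by omega)]; exact pv_covers_append k _ _ (hcovm m hm))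
            hC hresb
        · rw [if_neg (fun h7 => hcovq' (hsize_iff.mp h7))]
          exact ih (q ++ [(x, ((j0 : Nat) : Int))]) res _ leftN hP' (by simp; omega) hcnt1
            (fun m hm => by rw [hdropq' m (by omega)]; exact pv_covers_append k _ _ (hcovm m hm))
            hC hresb

-- the two folds agree from the initial states
theorem pv_loops_agree (nums : List (List Int)) (hk : 0 < nums.length) :
    (pvLoopA (pvPairs nums) (pvPairs nums)
        ((none : Option (Int × Int)), List.replicate nums.length 0, (nums.length : Int), 0)).1
      = (pvLoopB nums.length (pvPairs nums) (PySem.Dict.empty, none)).2 := by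
  have h0 : pvNcov nums.length ([] : List (Int × Int)) = 0 := by
    unfold pvNcov
    simp [occB]
  have hmain := pv_main nums.length hk (pvPairs nums) (pv_pairs_sorted nums) (pv_pairs_idx nums)
    (pvPairs nums) [] none (List.replicate nums.length 0) 0 (by simp) (by simp)
    ⟨by simp, fun j hj => by simp⟩
    (fun m hm => absurd hm (by omega))
    (by simpa using pv_not_covers_nil nums.length hk)
    (fun h => absurd (by simpa using h) (pv_not_covers_nil nums.length hk))
  simp only [List.drop_nil, h0, Nat.cast_zero, sub_zero, pvLast, List.foldl_nil] at hmain
  exact hmain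

-- ===== VERDICT (by name: the statement is the Claim_ definition above) =====
theorem smallestRangeSliding_spec : Claim_equal_smallestRangeSliding := by
  unfold Claim_equal_smallestRangeSliding
  intro nums _ hpre
  obtain ⟨hne, _⟩ := hpre
  have hk : 0 < nums.length := List.length_pos_of_ne_nil hne
  unfold Spec_smallestRangeSliding smallestRangeSliding smallestRangeSliding_alt
  simp only []
  rw [pv_loops_agree nums hk]
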